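-- pv_equiv track=rewrite | github.com/Podborsek/programiranje-1 | izpiti/2019-06-27/2019-06-27.py | ladje
-- ===== SOURCE A (Python) =====
-- def ladje(nosilnost, zabojniki):
--     #Ne dela
--     dolzina = len(zabojniki)
--
--
--     def pom(obremenitev, j):
--         if obremenitev == nosilnost:
--             return 1
--         else:
--             nacini = 0
--             for i in range(j,dolzina):
--                 teza = zabojniki[i]
--                 if obremenitev + teza == nosilnost:
--                     nacini += 1
--                 elif obremenitev + teza < nosilnost:
--                     nacini += pom(obremenitev + teza, j + i)
--             return nacini
--
--     return pom(0,0)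
-- ===== SOURCE B (Python) =====
-- def ladje(nosilnost, zabojniki):
--     # Iterative re-implementation: the recursive search is replaced by an
--     # explicit LIFO worklist of states (obremenitev, j); a state is counted
--     # when it is popped with obremenitev == nosilnost, and every i with
--     # obremenitev + zabojniki[i] <= nosilnost pushes the successor state
--     # (obremenitev + zabojniki[i], j + i), keeping A's j + i offset verbatim.
--     dolzina = len(zabojniki)
--     stack = [(0, 0)]
--     nacini = 0
--     while stack:
--         obremenitev, j = stack.pop()
--         if obremenitev == nosilnost:
--             nacini += 1
--             continue
--         for i in range(j, dolzina):
--             teza = zabojniki[i]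
--             if obremenitev + teza <= nosilnost:
--                 stack.append((obremenitev + teza, j + i))
--     return nacini
-- ===== Notes on version B (the rewrite author's own statement) =====
-- stated objective: alternative
-- what changed: B replaces A's nested recursion by an iterative explicit LIFO worklist of states (obremenitev, j): a popped state with obremenitev == nosilnost counts 1, otherwise each index i from j with obremenitev + zabojniki[i] <= nosilnost pushes the successor state (with A's j+i offset kept verbatim); no Python recursion is used.
import Mathlib
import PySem

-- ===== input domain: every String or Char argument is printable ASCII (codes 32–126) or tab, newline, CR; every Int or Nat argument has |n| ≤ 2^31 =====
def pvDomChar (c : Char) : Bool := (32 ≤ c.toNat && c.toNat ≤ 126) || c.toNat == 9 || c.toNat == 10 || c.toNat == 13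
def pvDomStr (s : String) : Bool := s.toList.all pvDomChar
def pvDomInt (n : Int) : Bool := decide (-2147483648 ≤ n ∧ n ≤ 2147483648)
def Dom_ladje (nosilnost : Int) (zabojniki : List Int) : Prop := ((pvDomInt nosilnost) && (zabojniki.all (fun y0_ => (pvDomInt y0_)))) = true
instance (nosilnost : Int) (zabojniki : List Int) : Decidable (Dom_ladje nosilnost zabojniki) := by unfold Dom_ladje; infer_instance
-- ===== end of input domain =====

-- B replaces A's nested recursion by an iterative explicit LIFO worklist of states
-- (obremenitev, j), counting a popped state when its load equals the capacity
-- (objective: alternative; same values, A's j+i offset kept verbatim).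
-- Both ports carry a fuel parameter only to make them total in Lean; on every input
-- admitted by Pre_ladje the fuel is large enough to never run out.

-- ===== PORT A =====
-- inner for-loop of pom: i runs over range(j, dolzina); `rec` is the recursive call pom
def loopA (nosilnost : Int) (zs : List Int) (rec : Int → Nat → Int) (o : Int) (j : Nat) :
    List Nat → Int → Int
  | [], nacini => nacini
  | i :: is, nacini =>
      let teza := zs.getD i 0
      if o + teza = nosilnost then loopA nosilnost zs rec o j is (nacini + 1)
      else if o + teza < nosilnost then
        loopA nosilnost zs rec o j is (nacini + rec (o + teza) (j + i))
      else loopA nosilnost zs rec o j is nacini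

-- pom(obremenitev, j); indices j, i are naturals (they start at 0 and only grow)
def pomA (nosilnost : Int) (zs : List Int) : Nat → Int → Nat → Int
  | 0, _, _ => 0
  | fuel+1, o, j =>
      if o = nosilnost then 1
      else loopA nosilnost zs (fun o' j' => pomA nosilnost zs fuel o' j') o j
        (List.range' j (zs.length - j)) 0

def ladje (nosilnost : Int) (zabojniki : List Int) : Int :=
  pomA nosilnost zabojniki (nosilnost.toNat + zabojniki.length + 2) 0 0

-- ===== PORT B =====
-- the inner for-loop of B: push every successor state onto the worklist (head = top
-- of the Python list, so pops come in the same LIFO order)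
def pushB (nosilnost : Int) (zs : List Int) (o : Int) (j : Nat) :
    List Nat → List (Int × Nat) → List (Int × Nat)
  | [], st => st
  | i :: is, st =>
      let teza := zs.getD i 0
      if o + teza ≤ nosilnost then pushB nosilnost zs o j is ((o + teza, j + i) :: st)
      else pushB nosilnost zs o j is st

-- the while-loop over the worklist, accumulating nacini
def runB (nosilnost : Int) (zs : List Int) : Nat → List (Int × Nat) → Int → Int
  | 0, _, nacini => nacini
  | _+1, [], nacini => nacini
  | fuel+1, (o, j) :: st, nacini =>
      if o = nosilnost then runB nosilnost zs fuel st (nacini + 1)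
      else runB nosilnost zs fuel
        (pushB nosilnost zs o j (List.range' j (zs.length - j)) st) nacini

def ladje_alt (nosilnost : Int) (zabojniki : List Int) : Int :=
  runB nosilnost zabojniki
    ((zabojniki.length + 1) ^ (nosilnost.toNat + zabojniki.length + 2)) [(0, 0)] 0

-- ===== PRECONDITION & SPEC =====
-- Pre_ladje excludes exactly the inputs on which Python A recurses forever through
-- index 0 (first weight ≤ 0 and strictly below a nonzero capacity) and therefore
-- raises RecursionError without returning; on every other input the search is finite.
def Pre_ladje (nosilnost : Int) (zabojniki : List Int) : Prop :=
  nosilnost = 0 ∨ zabojniki = [] ∨ nosilnost ≤ zabojniki.headD 0 ∨ 0 < zabojniki.headD 0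

instance (nosilnost : Int) (zabojniki : List Int) : Decidable (Pre_ladje nosilnost zabojniki) := by
  unfold Pre_ladje; infer_instance

def pvWitness_ladje : Int × List Int := (7, [3, 4, 2])

def Spec_ladje (nosilnost : Int) (zabojniki : List Int) (out : Int) : Prop :=
  out = ladje_alt nosilnost zabojniki

instance (nosilnost : Int) (zabojniki : List Int) (out : Int) : Decidable (Spec_ladje nosilnost zabojniki out) := by
  unfold Spec_ladje; infer_instance

-- ===== CLAIM (what is proved, stated in full; the proofs are below) =====
def Claim_equal_ladje : Prop := ∀ (nosilnost : Int) (zabojniki : List Int), Dom_ladje nosilnost zabojniki → Pre_ladje nosilnost zabojniki → Spec_ladje nosilnost zabojniki (ladje nosilnost zabojniki)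

-- ===== LEMMAS AND PROOFS =====

-- side condition used by the proofs: Pre_ minus the `nosilnost = 0` disjunct
def SideP (nosilnost : Int) (zs : List Int) : Prop :=
  zs = [] ∨ nosilnost ≤ zs.headD 0 ∨ 0 < zs.headD 0

-- states (o, 0) reachable by the search always carry a non-negative load
def GoodSt (o : Int) (j : Nat) : Prop := j = 0 → 0 ≤ o

-- strict bound on the remaining recursion depth from state (o, j); always ≥ 1
def Dbound (nosilnost : Int) (len : Nat) (o : Int) (j : Nat) : Nat :=
  (if j = 0 then (nosilnost - o).toNat else 0) + (len + 1 - min j len)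

lemma Dbound_pos (nosilnost : Int) (len : Nat) (o : Int) (j : Nat) :
    1 ≤ Dbound nosilnost len o j := by
  unfold Dbound; split <;> omega

lemma Dbound_zeroj (nosilnost : Int) (len : Nat) (o : Int) :
    Dbound nosilnost len o 0 = (nosilnost - o).toNat + (len + 1) := by
  unfold Dbound; simp

lemma Dbound_posj (nosilnost : Int) (len : Nat) (o : Int) (j : Nat) (h : j ≠ 0) :
    Dbound nosilnost len o j = len + 1 - min j len := by
  unfold Dbound; simp [h]

lemma headD_eq_getD (zs : List Int) (h : zs ≠ []) : zs.headD 0 = zs.getD 0 0 := by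
  cases zs with
  | nil => exact absurd rfl h
  | cons a l => rfl

-- every strictly-lighter child of a good state is good and strictly smaller
lemma childOK (nosilnost : Int) (zs : List Int) (o : Int) (j i : Nat)
    (hP : SideP nosilnost zs) (hG : GoodSt o j) (hji : j ≤ i) (hil : i < zs.length)
    (hlt : o + zs.getD i 0 < nosilnost) :
    GoodSt (o + zs.getD i 0) (j + i) ∧
      Dbound nosilnost zs.length (o + zs.getD i 0) (j + i) < Dbound nosilnost zs.length o j := by
  have hne : zs ≠ [] := by
    intro h; subst h; simp at hil
  by_cases h0 : j + i = 0
  · have hj : j = 0 := by omega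
    have hi : i = 0 := by omega
    subst hj; subst hi
    have ho : 0 ≤ o := hG rfl
    have hz : zs.headD 0 = zs.getD 0 0 := headD_eq_getD zs hne
    rcases hP with h | h | h
    · exact absurd h hne
    · rw [hz] at h; omega
    · rw [hz] at h
      refine ⟨fun _ => by omega, ?_⟩
      rw [Nat.zero_add, Dbound_zeroj, Dbound_zeroj]
      omega
  · refine ⟨fun h => absurd h h0, ?_⟩
    by_cases hj : j = 0
    · subst hj
      rw [Dbound_zeroj, Dbound_posj _ _ _ _ h0]
      omega
    · rw [Dbound_posj _ _ _ _ hj, Dbound_posj _ _ _ _ h0]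
      omega

lemma mem_range'_bounds {j len i : Nat} (h : i ∈ List.range' j (len - j)) :
    j ≤ i ∧ i < len := by
  rw [List.mem_range'] at h
  omega

-- congruence for A's loop: the result only depends on rec at the recursing branch
lemma loopA_congr (nosilnost : Int) (zs : List Int) (rec1 rec2 : Int → Nat → Int)
    (o : Int) (j : Nat) :
    ∀ (is : List Nat) (nacini : Int),
      (∀ i ∈ is, o + zs.getD i 0 < nosilnost →
        rec1 (o + zs.getD i 0) (j + i) = rec2 (o + zs.getD i 0) (j + i)) →
      loopA nosilnost zs rec1 o j is nacini = loopA nosilnost zs rec2 o j is nacini := by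
  intro is
  induction is with
  | nil => intro nacini _; rfl
  | cons i is ih =>
      intro nacini h
      simp only [loopA]
      split
      · exact ih _ (fun i' hi' => h i' (List.mem_cons_of_mem _ hi'))
      · split
        · rw [h i (List.mem_cons_self) (by assumption)]
          exact ih _ (fun i' hi' => h i' (List.mem_cons_of_mem _ hi'))
        · exact ih _ (fun i' hi' => h i' (List.mem_cons_of_mem _ hi'))

-- with enough fuel, pomA's value does not depend on the fuel
lemma pomA_stable (nosilnost : Int) (zs : List Int) (hP : SideP nosilnost zs) :
    ∀ (n : Nat) (o : Int) (j : Nat) (F1 F2 : Nat), GoodSt o j →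
      Dbound nosilnost zs.length o j ≤ n →
      Dbound nosilnost zs.length o j ≤ F1 → Dbound nosilnost zs.length o j ≤ F2 →
      pomA nosilnost zs F1 o j = pomA nosilnost zs F2 o j := by
  intro n
  induction n with
  | zero =>
      intro o j F1 F2 _ hn _ _
      have := Dbound_pos nosilnost zs.length o j; omega
  | succ n ih =>
      intro o j F1 F2 hG hn hF1 hF2
      have h1 := Dbound_pos nosilnost zs.length o j
      obtain ⟨f1, rfl⟩ : ∃ f1, F1 = f1 + 1 := ⟨F1 - 1, by omega⟩
      obtain ⟨f2, rfl⟩ : ∃ f2, F2 = f2 + 1 := ⟨F2 - 1, by omega⟩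
      simp only [pomA]
      split
      · rfl
      · apply loopA_congr
        intro i hi hlt
        obtain ⟨hji, hil⟩ := mem_range'_bounds hi
        obtain ⟨hGc, hDc⟩ := childOK nosilnost zs o j i hP hG hji hil hlt
        exact ih _ _ f1 f2 hGc (by omega) (by omega) (by omega)

-- the fuel-independent value of pom at a state
def pomW (nosilnost : Int) (zs : List Int) (o : Int) (j : Nat) : Int :=
  pomA nosilnost zs (Dbound nosilnost zs.length o j) o j

lemma pomW_self (nosilnost : Int) (zs : List Int) (j : Nat) :
    pomW nosilnost zs nosilnost j = 1 := by
  unfold pomW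
  have h1 := Dbound_pos nosilnost zs.length nosilnost j
  obtain ⟨d, hd⟩ : ∃ d, Dbound nosilnost zs.length nosilnost j = d + 1 :=
    ⟨Dbound nosilnost zs.length nosilnost j - 1, by omega⟩
  rw [hd]
  simp [pomA]

lemma pomA_eq_pomW (nosilnost : Int) (zs : List Int) (hP : SideP nosilnost zs)
    (o : Int) (j : Nat) (F : Nat) (hG : GoodSt o j)
    (hF : Dbound nosilnost zs.length o j ≤ F) :
    pomA nosilnost zs F o j = pomW nosilnost zs o j :=
  pomA_stable nosilnost zs hP (Dbound nosilnost zs.length o j) o j F _ hG le_rfl hF le_rfl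

-- keystone: pomW at a non-final state unfolds to A's loop with rec := pomW
lemma pomW_unfold (nosilnost : Int) (zs : List Int) (hP : SideP nosilnost zs)
    (o : Int) (j : Nat) (hG : GoodSt o j) (ho : o ≠ nosilnost) :
    pomW nosilnost zs o j =
      loopA nosilnost zs (fun o' j' => pomW nosilnost zs o' j') o j
        (List.range' j (zs.length - j)) 0 := by
  have h1 := Dbound_pos nosilnost zs.length o j
  obtain ⟨d, hd⟩ : ∃ d, Dbound nosilnost zs.length o j = d + 1 :=
    ⟨Dbound nosilnost zs.length o j - 1, by omega⟩
  unfold pomW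
  rw [hd]
  simp only [pomA, if_neg ho]
  apply loopA_congr
  intro i hi hlt
  obtain ⟨hji, hil⟩ := mem_range'_bounds hi
  obtain ⟨hGc, hDc⟩ := childOK nosilnost zs o j i hP hG hji hil hlt
  exact pomA_eq_pomW nosilnost zs hP _ _ d hGc (by omega)

-- A's loop is additive in its accumulator
lemma loopA_add (nosilnost : Int) (zs : List Int) (rec : Int → Nat → Int)
    (o : Int) (j : Nat) :
    ∀ (is : List Nat) (a x : Int),
      loopA nosilnost zs rec o j is (a + x) = loopA nosilnost zs rec o j is a + x := by
  intro is
  induction is with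
  | nil => intro a x; rfl
  | cons i is ih =>
      intro a x
      simp only [loopA]
      split
      · rw [show a + x + 1 = (a + 1) + x by ring, ih]
      · split
        · rw [show a + x + rec (o + zs.getD i 0) (j + i)
              = (a + rec (o + zs.getD i 0) (j + i)) + x by ring, ih]
        · exact ih a x

-- a state is acceptable on the worklist if it is final or good
def OkSt (nosilnost : Int) (o : Int) (j : Nat) : Prop :=
  o = nosilnost ∨ GoodSt o j

-- potential of a single state: final states cost 1 pop, others at most (len+1)^Dbound pops
def PhiS (nosilnost : Int) (len : Nat) (s : Int × Nat) : Nat :=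
  if s.1 = nosilnost then 1 else (len + 1) ^ Dbound nosilnost len s.1 s.2

def PhiL (nosilnost : Int) (len : Nat) (st : List (Int × Nat)) : Nat :=
  (st.map (PhiS nosilnost len)).sum

-- total pomW value of a worklist
def SumW (nosilnost : Int) (zs : List Int) (st : List (Int × Nat)) : Int :=
  (st.map (fun s => pomW nosilnost zs s.1 s.2)).sum

lemma PhiS_pos (nosilnost : Int) (len : Nat) (s : Int × Nat) :
    1 ≤ PhiS nosilnost len s := by
  unfold PhiS
  split
  · exact le_rfl
  · exact Nat.one_le_pow _ _ (by omega)

-- B's push loop: it appends exactly the ≤-successors, whose pomW values sum to A's loop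
lemma pushB_spec (nosilnost : Int) (zs : List Int) (hP : SideP nosilnost zs)
    (o : Int) (j : Nat) (hG : GoodSt o j) :
    ∀ (is : List Nat) (st : List (Int × Nat)),
      (∀ i ∈ is, j ≤ i ∧ i < zs.length) →
      ∃ K : List (Int × Nat),
        pushB nosilnost zs o j is st = K ++ st ∧
        SumW nosilnost zs K =
          loopA nosilnost zs (fun o' j' => pomW nosilnost zs o' j') o j is 0 ∧
        (∀ s ∈ K, OkSt nosilnost s.1 s.2 ∧
          PhiS nosilnost zs.length s
            ≤ (zs.length + 1) ^ (Dbound nosilnost zs.length o j - 1)) ∧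
        K.length ≤ is.length := by
  intro is
  induction is with
  | nil =>
      intro st _
      exact ⟨[], rfl, rfl, by simp, by simp⟩
  | cons i is ih =>
      intro st hb
      have hbi := hb i List.mem_cons_self
      have hb' : ∀ i' ∈ is, j ≤ i' ∧ i' < zs.length :=
        fun i' hi' => hb i' (List.mem_cons_of_mem _ hi')
      simp only [pushB, loopA]
      by_cases heq : o + zs.getD i 0 = nosilnost
      · rw [if_pos (le_of_eq heq), if_pos heq]
        obtain ⟨K, h1, h2, h3, h4⟩ := ih ((o + zs.getD i 0, j + i) :: st) hb'
        have hc : pomW nosilnost zs (o + zs.getD i 0) (j + i) = 1 := by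
          rw [heq]; exact pomW_self nosilnost zs (j + i)
        have hsum : SumW nosilnost zs (K ++ [(o + zs.getD i 0, j + i)]) =
            SumW nosilnost zs K + pomW nosilnost zs (o + zs.getD i 0) (j + i) := by
          unfold SumW; rw [List.map_append, List.sum_append]; simp
        refine ⟨K ++ [(o + zs.getD i 0, j + i)], by simpa using h1, ?_, ?_, ?_⟩
        · rw [hsum, h2, hc, loopA_add]
        · intro s hs
          rcases List.mem_append.1 hs with hs | hs
          · exact h3 s hs
          · rw [List.mem_singleton] at hs
            subst hs
            refine ⟨Or.inl heq, ?_⟩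
            have : PhiS nosilnost zs.length (o + zs.getD i 0, j + i) = 1 := by
              simp only [PhiS]; rw [if_pos heq]
            rw [this]
            exact Nat.one_le_pow _ _ (by omega)
        · rw [List.length_append]; simp; omega
      · by_cases hlt : o + zs.getD i 0 < nosilnost
        · rw [if_pos (le_of_lt hlt), if_neg heq, if_pos hlt]
          obtain ⟨K, h1, h2, h3, h4⟩ := ih ((o + zs.getD i 0, j + i) :: st) hb'
          obtain ⟨hGc, hDc⟩ := childOK nosilnost zs o j i hP hG hbi.1 hbi.2 hlt
          have hsum : SumW nosilnost zs (K ++ [(o + zs.getD i 0, j + i)]) =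
              SumW nosilnost zs K + pomW nosilnost zs (o + zs.getD i 0) (j + i) := by
            unfold SumW; rw [List.map_append, List.sum_append]; simp
          refine ⟨K ++ [(o + zs.getD i 0, j + i)], by simpa using h1, ?_, ?_, ?_⟩
          · rw [hsum, h2, loopA_add]
          · intro s hs
            rcases List.mem_append.1 hs with hs | hs
            · exact h3 s hs
            · rw [List.mem_singleton] at hs
              subst hs
              refine ⟨Or.inr hGc, ?_⟩
              simp only [PhiS]
              split
              · exact Nat.one_le_pow _ _ (by omega)
              · exact Nat.pow_le_pow_right (by omega) (by omega)
          · rw [List.length_append]; simp; omega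
        · have hgt : ¬ o + zs.getD i 0 ≤ nosilnost := by omega
          rw [if_neg hgt, if_neg heq, if_neg hlt]
          obtain ⟨K, h1, h2, h3, h4⟩ := ih st hb'
          exact ⟨K, h1, h2, h3, by simp; omega⟩

-- main invariant: with fuel at least the total potential, B's worklist loop
-- returns the accumulator plus the total pomW value of the worklist
lemma runB_spec (nosilnost : Int) (zs : List Int) (hP : SideP nosilnost zs) :
    ∀ (fuel : Nat) (st : List (Int × Nat)) (acc : Int),
      (∀ s ∈ st, OkSt nosilnost s.1 s.2) →
      PhiL nosilnost zs.length st ≤ fuel →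
      runB nosilnost zs fuel st acc = acc + SumW nosilnost zs st := by
  intro fuel
  induction fuel with
  | zero =>
      intro st acc _ hphi
      cases st with
      | nil => simp [runB, SumW]
      | cons s st =>
          exfalso
          have h1 := PhiS_pos nosilnost zs.length s
          have : PhiL nosilnost zs.length (s :: st) =
              PhiS nosilnost zs.length s + PhiL nosilnost zs.length st := by
            simp [PhiL]
          omega
  | succ fuel ih =>
      intro st acc hok hphi
      cases st with
      | nil => simp [runB, SumW]
      | cons s st =>
          obtain ⟨o, j⟩ := s
          have hsplit : PhiL nosilnost zs.length ((o, j) :: st) =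
              PhiS nosilnost zs.length (o, j) + PhiL nosilnost zs.length st := by
            simp [PhiL]
          have hsum : SumW nosilnost zs ((o, j) :: st) =
              pomW nosilnost zs o j + SumW nosilnost zs st := by
            simp [SumW]
          by_cases ho : o = nosilnost
          · have hphi1 : PhiS nosilnost zs.length (o, j) = 1 := by
              simp [PhiS, ho]
            have hrec : runB nosilnost zs fuel st (acc + 1) =
                acc + 1 + SumW nosilnost zs st :=
              ih st (acc + 1) (fun s hs => hok s (List.mem_cons_of_mem _ hs)) (by omega)
            rw [runB, if_pos ho, hrec, hsum, ho, pomW_self]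
            ring
          · have hG : GoodSt o j := (hok (o, j) List.mem_cons_self).resolve_left ho
            have hD1 := Dbound_pos nosilnost zs.length o j
            obtain ⟨d, hd⟩ : ∃ d, Dbound nosilnost zs.length o j = d + 1 :=
              ⟨Dbound nosilnost zs.length o j - 1, by omega⟩
            have hphi0 : PhiS nosilnost zs.length (o, j) =
                (zs.length + 1) ^ (d + 1) := by
              simp only [PhiS]
              rw [if_neg ho, hd]
            obtain ⟨K, h1, h2, h3, h4⟩ := pushB_spec nosilnost zs hP o j hG
              (List.range' j (zs.length - j)) st
              (fun i hi => mem_range'_bounds hi)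
            have hlenK : K.length ≤ zs.length := by
              have h5 := h4
              rw [List.length_range'] at h5
              omega
            have hphiK : PhiL nosilnost zs.length K ≤ K.length * (zs.length + 1) ^ d := by
              unfold PhiL
              calc (K.map (PhiS nosilnost zs.length)).sum
                  ≤ (K.map (PhiS nosilnost zs.length)).length * (zs.length + 1) ^ d := by
                    apply List.sum_le_card_nsmul
                    intro x hx
                    obtain ⟨s, hs, rfl⟩ := List.mem_map.1 hx
                    have h6 := (h3 s hs).2
                    rw [hd] at h6
                    simpa using h6
                _ = K.length * (zs.length + 1) ^ d := by simp
            have hKlen2 : PhiL nosilnost zs.length K ≤ zs.length * (zs.length + 1) ^ d := by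
              have := Nat.mul_le_mul_right ((zs.length + 1) ^ d) hlenK
              omega
            have hpow : (zs.length + 1) ^ (d + 1) =
                zs.length * (zs.length + 1) ^ d + (zs.length + 1) ^ d := by
              rw [pow_succ]; ring
            have hpowpos : 1 ≤ (zs.length + 1) ^ d := Nat.one_le_pow _ _ (by omega)
            have happ : PhiL nosilnost zs.length (K ++ st) =
                PhiL nosilnost zs.length K + PhiL nosilnost zs.length st := by
              simp [PhiL]
            have hsumapp : SumW nosilnost zs (K ++ st) =
                SumW nosilnost zs K + SumW nosilnost zs st := by
              simp [SumW]
            have hokK : ∀ s ∈ K ++ st, OkSt nosilnost s.1 s.2 := by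
              intro s hs
              rcases List.mem_append.1 hs with hs | hs
              · exact (h3 s hs).1
              · exact hok s (List.mem_cons_of_mem _ hs)
            have hrec : runB nosilnost zs fuel (K ++ st) acc =
                acc + SumW nosilnost zs (K ++ st) :=
              ih (K ++ st) acc hokK (by omega)
            rw [runB, if_neg ho, h1, hrec, hsumapp, h2,
              ← pomW_unfold nosilnost zs hP o j hG ho, hsum]

-- ===== VERDICT (by name: the statement is the Claim_ definition above) =====
theorem ladje_spec : Claim_equal_ladje := by
  intro nosilnost zabojniki _ hPre
  unfold Spec_ladje ladje ladje_alt
  by_cases h0 : nosilnost = 0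
  · subst h0
    have h2 : Int.toNat 0 + zabojniki.length + 2 = zabojniki.length + 1 + 1 := by omega
    rw [h2]
    obtain ⟨f, hf⟩ : ∃ f, (zabojniki.length + 1) ^ (zabojniki.length + 1 + 1) = f + 1 :=
      ⟨(zabojniki.length + 1) ^ (zabojniki.length + 1 + 1) - 1, by
        have := Nat.one_le_pow (zabojniki.length + 1 + 1) (zabojniki.length + 1) (by omega)
        omega⟩
    rw [hf]
    cases f <;> simp [pomA, runB]
  · have hP : SideP nosilnost zabojniki := by
      unfold SideP
      rcases hPre with h | h | h | h
      · exact absurd h h0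
      · exact Or.inl h
      · exact Or.inr (Or.inl h)
      · exact Or.inr (Or.inr h)
    have hG : GoodSt 0 0 := fun _ => le_refl 0
    have hD00 : Dbound nosilnost zabojniki.length 0 0 =
        nosilnost.toNat + zabojniki.length + 1 := by
      rw [Dbound_zeroj]
      omega
    have hA : pomA nosilnost zabojniki (nosilnost.toNat + zabojniki.length + 2) 0 0 =
        pomW nosilnost zabojniki 0 0 :=
      pomA_eq_pomW nosilnost zabojniki hP 0 0 _ hG (by omega)
    have hPhi : PhiL nosilnost zabojniki.length [(0, 0)] ≤
        (zabojniki.length + 1) ^ (nosilnost.toNat + zabojniki.length + 2) := by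
      have h7 : PhiL nosilnost zabojniki.length [(0, 0)] =
          PhiS nosilnost zabojniki.length (0, 0) := by simp [PhiL]
      rw [h7]
      unfold PhiS
      split
      · exact Nat.one_le_pow _ _ (by omega)
      · rw [hD00]
        exact Nat.pow_le_pow_right (by omega) (by omega)
    have hB := runB_spec nosilnost zabojniki hP
      ((zabojniki.length + 1) ^ (nosilnost.toNat + zabojniki.length + 2))
      [(0, 0)] 0
      (fun s hs => by
        rw [List.mem_singleton] at hs
        subst hs
        exact Or.inr hG) hPhi
    rw [hA, hB]
    simp [SumW]
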